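-- pv_equiv track=rewrite | github.com/rykerns/ecen4293_final | rs_analyzer/gf256.py | poly_deriv
-- ===== SOURCE A (Python) =====
-- def _strip(p):
--     """Strip trailing zero coefficients, keeping at least [0]."""
--     out = list(p)
--     while len(out) > 1 and out[-1] == 0:
--         out.pop() # trim high-degree zeros
--     return out
--
-- def poly_deriv(p):
--     """
--     Formal derivative of polynomial p over GF(2^8).
--
--     In characteristic 2, d/dx(x^i) = x^(i-1) if i is odd, else 0.
--
--     In GF(p) for odd p you'd multiply each coefficient by i mod p; in GF(2ⁿ) the factor is always 0 or 1
--     """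
--     if len(p) <= 1:
--         return [0] # derivative of constant is zero
--     result = [0] * (len(p) - 1) # one fewer coeff
--     for i in range(1, len(p)): #skip constant in all other cases
--         if i & 1: # is i odd?
--             result[i - 1] = p[i] #if so keep and shift by one position
--     return _strip(result)
-- ===== SOURCE B (Python) =====
-- def poly_deriv(p):
--     """Formal derivative over GF(2^8): find the highest odd-degree nonzero
--     coefficient, then emit the (already stripped) derivative by closed formula."""
--     k = 0
--     for i in range(1, len(p), 2):
--         if p[i] != 0:
--             k = i
--     if k == 0:
--         return [0]
--     return [p[j + 1] if j % 2 == 0 else 0 for j in range(k)]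
-- ===== Notes on version B (the rewrite author's own statement) =====
-- stated objective: simpler
-- what changed: Instead of filling a zero array by an index loop and then stripping trailing zeros, B first scans the odd indices once for the highest nonzero coefficient k and then emits the already-stripped derivative of length k by a closed formula, with no mutation and no _strip helper.
import Mathlib
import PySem

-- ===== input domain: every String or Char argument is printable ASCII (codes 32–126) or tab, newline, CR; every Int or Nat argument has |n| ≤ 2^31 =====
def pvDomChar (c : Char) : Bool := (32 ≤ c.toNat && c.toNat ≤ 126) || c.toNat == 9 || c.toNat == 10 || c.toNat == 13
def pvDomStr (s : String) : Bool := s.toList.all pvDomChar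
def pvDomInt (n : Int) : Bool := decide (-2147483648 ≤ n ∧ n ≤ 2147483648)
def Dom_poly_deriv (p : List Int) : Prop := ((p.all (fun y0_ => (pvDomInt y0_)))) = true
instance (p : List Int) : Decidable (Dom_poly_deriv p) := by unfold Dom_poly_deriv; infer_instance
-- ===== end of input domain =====

-- B scans once for the highest odd-degree nonzero coefficient and then emits the
-- already-stripped derivative by closed formula: no zero array, no mutation, no
-- _strip pass (objective: simpler).

-- ===== PORT A =====
-- _strip: out = list(p); while len(out) > 1 and out[-1] == 0: out.pop()
def pvStrip (out : List Int) : List Int :=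
  if _h : 1 < out.length ∧ out.getLast? = some 0 then pvStrip out.dropLast else out
termination_by out.length
decreasing_by simp [List.length_dropLast]; omega

def poly_deriv (p : List Int) : List Int :=
  if p.length ≤ 1 then [0]
  else
    pvStrip ((PySem.List.pyRange 1 (p.length : Int) 1).foldl
      (fun result i =>
        if PySem.Int.band i 1 ≠ 0 then
          PySem.List.pySetD result (i - 1) (PySem.List.pyGetD p i 0)
        else result)
      (List.replicate (p.length - 1) (0 : Int)))

-- ===== PORT B =====
-- k = 0; for i in range(1, len(p), 2): if p[i] != 0: k = i
-- if k == 0: return [0]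
-- return [p[j + 1] if j % 2 == 0 else 0 for j in range(k)]
def poly_deriv_alt (p : List Int) : List Int :=
  let k := (PySem.List.pyRange 1 (p.length : Int) 2).foldl
    (fun k i => if PySem.List.pyGetD p i 0 ≠ 0 then i else k) 0
  if k = 0 then [0]
  else (PySem.List.pyRange 0 k 1).map
    (fun j => if PySem.Int.mod j 2 = 0 then PySem.List.pyGetD p (j + 1) 0 else 0)

-- ===== PRECONDITION & SPEC =====
def Spec_poly_deriv (p : List Int) (out : List Int) : Prop := out = poly_deriv_alt p
instance (p : List Int) (out : List Int) : Decidable (Spec_poly_deriv p out) := by unfold Spec_poly_deriv; infer_instance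

-- ===== CLAIM (what is proved, stated in full; the proofs are below) =====
def Claim_equal_poly_deriv : Prop := ∀ (p : List Int), Dom_poly_deriv p → Spec_poly_deriv p (poly_deriv p)

-- ===== LEMMAS AND PROOFS =====

-- canonical form of A's pre-strip list: p.tail with every odd position zeroed
def pvAltKZ : List Int → List Int
  | [] => []
  | [x] => [x]
  | x :: _ :: rest => x :: 0 :: pvAltKZ rest

theorem pvAltKZ_length : (q : List Int) → (pvAltKZ q).length = q.length
  | [] => rfl
  | [_] => rfl
  | _ :: _ :: r => by simp [pvAltKZ, pvAltKZ_length r]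

theorem pvAltKZ_getElem? : (q : List Int) → (j : Nat) → j < q.length →
    (pvAltKZ q)[j]? = if j % 2 = 0 then q[j]? else some 0
  | [x], 0, _ => by simp [pvAltKZ]
  | x :: y :: r, 0, _ => by simp [pvAltKZ]
  | x :: y :: r, 1, _ => by simp [pvAltKZ]
  | x :: y :: r, j + 2, hj => by
      have ih := pvAltKZ_getElem? r j (by simpa using hj)
      simpa [pvAltKZ, Nat.add_mod_right] using ih

-- ---- A's loop, rebased over List.range ----
def pvG (p : List Int) (m : Nat) : List Int :=
  (List.range m).foldl
    (fun res (k : Nat) =>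
      if PySem.Int.band (1 + (k : Int)) 1 ≠ 0 then
        PySem.List.pySetD res (1 + (k : Int) - 1) (PySem.List.pyGetD p (1 + (k : Int)) 0)
      else res)
    (List.replicate (p.length - 1) (0 : Int))

theorem pvG_succ (p : List Int) (m : Nat) :
    pvG p (m + 1) =
      (if PySem.Int.band (1 + (m : Int)) 1 ≠ 0 then
        PySem.List.pySetD (pvG p m) (1 + (m : Int) - 1) (PySem.List.pyGetD p (1 + (m : Int)) 0)
      else pvG p m) := by
  simp [pvG, List.range_succ]

theorem pvBand_iff (m : Nat) : (PySem.Int.band (1 + (m : Int)) 1 ≠ 0) ↔ m % 2 = 0 := by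
  rw [PySem.Int.band_of_nonneg (by positivity) (by norm_num)]
  have h1 : (1 + (m : Int)).toNat = m + 1 := by omega
  have h2 : (1 : Int).toNat = 1 := rfl
  rw [h1, h2, Nat.and_one_is_mod]
  omega

theorem pvG_length (p : List Int) (m : Nat) : (pvG p m).length = p.length - 1 := by
  induction m with
  | zero => simp [pvG]
  | succ m ih =>
      rw [pvG_succ]
      split
      · simpa using ih
      · exact ih

theorem pvG_getElem? (p : List Int) (m : Nat) (j : Nat) (hj : j < p.length - 1) :
    (pvG p m)[j]? = some (if j % 2 = 0 ∧ j < m then PySem.List.pyGetD p ((j : Int) + 1) 0 else 0) := by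
  induction m with
  | zero => simp [pvG, hj]
  | succ m ih =>
      rw [pvG_succ]
      by_cases hb : PySem.Int.band (1 + (m : Int)) 1 ≠ 0
      · have hme : m % 2 = 0 := (pvBand_iff m).mp hb
        rw [if_pos hb]
        have hidx : (1 : Int) + (m : Int) - 1 = ((m : Nat) : Int) := by omega
        rw [hidx, PySem.List.pySetD_natCast, List.getElem?_set]
        by_cases hjm : m = j
        · rw [if_pos hjm, if_pos (by rw [pvG_length]; omega)]
          have h1j : (1 : Int) + (m : Int) = (j : Int) + 1 := by rw [hjm]; ring
          rw [h1j, if_pos ⟨hjm ▸ hme, by omega⟩]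
        · rw [if_neg hjm, ih]
          by_cases h1 : j % 2 = 0 ∧ j < m + 1
          · rw [if_pos h1, if_pos ⟨h1.1, by omega⟩]
          · rw [if_neg h1, if_neg (by omega)]
      · have hmo : ¬ m % 2 = 0 := fun h => hb ((pvBand_iff m).mpr h)
        rw [if_neg hb, ih]
        by_cases h1 : j % 2 = 0 ∧ j < m + 1
        · rw [if_pos h1, if_pos ⟨h1.1, by omega⟩]
        · rw [if_neg h1, if_neg (by omega)]

theorem pvCore_eq (a : Int) (q : List Int) :
    (PySem.List.pyRange 1 (((a :: q).length : Int)) 1).foldl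
      (fun result i =>
        if PySem.Int.band i 1 ≠ 0 then
          PySem.List.pySetD result (i - 1) (PySem.List.pyGetD (a :: q) i 0)
        else result)
      (List.replicate ((a :: q).length - 1) (0 : Int)) = pvAltKZ q := by
  have hr : PySem.List.pyRange 1 (((a :: q).length : Int)) 1 =
      List.map (fun (k : Nat) => 1 + (k : Int)) (List.range q.length) := by
    apply List.ext_getElem
    · rw [PySem.List.length_pyRange_one]; simp
    · intro i h1 h2
      rw [PySem.List.getElem_pyRange_one]
      simp
  rw [hr, List.foldl_map]
  show pvG (a :: q) q.length = pvAltKZ q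
  apply List.ext_getElem?
  intro j
  by_cases hj : j < q.length
  · rw [pvG_getElem? (a :: q) q.length j (by simpa using hj),
      pvAltKZ_getElem? q j hj]
    have hget : PySem.List.pyGetD (a :: q) ((j : Int) + 1) 0 = q.getD j 0 := by
      have hc : ((j : Int) + 1) = (((j + 1 : Nat)) : Int) := by push_cast; ring
      rw [hc, PySem.List.pyGetD_natCast]
      rfl
    by_cases hj2 : j % 2 = 0
    · rw [if_pos hj2, if_pos ⟨hj2, hj⟩, hget, List.getElem?_eq_getElem hj]
      simp [List.getD_eq_getElem?_getD, List.getElem?_eq_getElem hj]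
    · simp [hj2]
  · have h1 : (pvG (a :: q) q.length).length ≤ j := by
      rw [pvG_length]; simpa using Nat.le_of_not_lt hj
    have h2 : (pvAltKZ q).length ≤ j := by
      rw [pvAltKZ_length]; exact Nat.le_of_not_lt hj
    rw [List.getElem?_eq_none h1, List.getElem?_eq_none h2]

-- ---- strip characterizations ----
theorem pvStrip_zeros : ∀ (n : Nat) (l : List Int), l.length = n → 1 ≤ n →
    (∀ j, j < n → l[j]? = some 0) → pvStrip l = [0]
  | 0, _, _, h, _ => by omega
  | 1, l, hl, _, hz => by
      rw [pvStrip]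
      rw [dif_neg (by omega)]
      have := hz 0 (by omega)
      cases l with
      | nil => simp at hl
      | cons x t =>
        cases t with
        | nil => simpa using this
        | cons y t => simp at hl
  | n + 2, l, hl, _, hz => by
      rw [pvStrip]
      rw [dif_pos ⟨by omega, by
        rw [List.getLast?_eq_getElem?, hl]
        exact hz (n + 1) (by omega)⟩]
      exact pvStrip_zeros (n + 1) l.dropLast (by simp [hl]) (by omega)
        (fun j hj => by
          rw [List.getElem?_dropLast, if_pos (by omega)]
          exact hz j (by omega))

theorem pvStrip_take : ∀ (n : Nat) (l : List Int) (k : Nat), l.length = n → 1 ≤ k → k ≤ n →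
    l[k - 1]? ≠ some 0 → (∀ j, k ≤ j → j < n → l[j]? = some 0) → pvStrip l = l.take k
  | 0, _, _, _, _, _, _, _ => by omega
  | n + 1, l, k, hl, hk1, hkn, hlast, hz => by
      by_cases hke : k = n + 1
      · rw [pvStrip, dif_neg]
        · have hkl : k = l.length := by omega
          rw [hkl, List.take_length]
        · rintro ⟨-, hlz⟩
          rw [List.getLast?_eq_getElem?, hl] at hlz
          exact hlast (by rw [← hke] at hlz; simpa using hlz)
      · have hkn' : k ≤ n := by omega
        have hn1 : 1 ≤ n := le_trans hk1 hkn'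
        rw [pvStrip, dif_pos ⟨by omega, by
          rw [List.getLast?_eq_getElem?, hl]
          exact hz n hkn' (by omega)⟩]
        have ih := pvStrip_take n l.dropLast k (by simp [hl]) hk1 hkn'
          (by rw [List.getElem?_dropLast, if_pos (by omega)]; exact hlast)
          (fun j hj1 hj2 => by
            rw [List.getElem?_dropLast, if_pos (by omega)]
            exact hz j hj1 (by omega))
        rw [ih, List.dropLast_eq_take, List.take_take, min_eq_left (by omega)]

-- ---- B's scan for the last nonzero odd coefficient ----
theorem pvFold_char (p : List Int) : ∀ (m : Nat),
    (((List.range m).foldl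
        (fun (k : Int) (t : Nat) => if PySem.List.pyGetD p (1 + 2 * (t : Int)) 0 ≠ 0 then 1 + 2 * (t : Int) else k) 0 = 0 ∧
      ∀ t, t < m → PySem.List.pyGetD p (1 + 2 * (t : Int)) 0 = 0)
    ∨ (∃ T, T < m ∧
        (List.range m).foldl
          (fun (k : Int) (t : Nat) => if PySem.List.pyGetD p (1 + 2 * (t : Int)) 0 ≠ 0 then 1 + 2 * (t : Int) else k) 0
          = 1 + 2 * (T : Int) ∧
        PySem.List.pyGetD p (1 + 2 * (T : Int)) 0 ≠ 0 ∧
        ∀ t, T < t → t < m → PySem.List.pyGetD p (1 + 2 * (t : Int)) 0 = 0))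
  | 0 => by left; exact ⟨rfl, fun t h => by omega⟩
  | m + 1 => by
      have ih := pvFold_char p m
      rw [List.range_succ, List.foldl_append]
      by_cases hm : PySem.List.pyGetD p (1 + 2 * (m : Int)) 0 ≠ 0
      · right
        exact ⟨m, by omega, by simp [hm], hm, fun t h1 h2 => by omega⟩
      · push Not at hm
        rcases ih with ⟨he, hall⟩ | ⟨T, hT, he, hne, hafter⟩
        · left
          refine ⟨by simpa [hm] using he, fun t ht => ?_⟩
          rcases Nat.lt_succ_iff_lt_or_eq.mp ht with h | h
          · exact hall t h
          · rw [h]; exact hm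
        · right
          refine ⟨T, by omega, by simpa [hm] using he, hne, fun t h1 h2 => ?_⟩
          rcases Nat.lt_succ_iff_lt_or_eq.mp h2 with h | h
          · exact hafter t h1 h
          · rw [h]; exact hm

theorem pvGetD_tail (a : Int) (q : List Int) (j : Nat) :
    PySem.List.pyGetD (a :: q) ((j : Int) + 1) 0 = q.getD j 0 := by
  have hc : ((j : Int) + 1) = (((j + 1 : Nat)) : Int) := by push_cast; ring
  rw [hc, PySem.List.pyGetD_natCast]
  rfl

-- ===== VERDICT (by name: the statement is the Claim_ definition above) =====
theorem poly_deriv_spec : Claim_equal_poly_deriv := by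
  unfold Claim_equal_poly_deriv Spec_poly_deriv
  intro p _
  unfold poly_deriv poly_deriv_alt
  by_cases h : p.length ≤ 1
  · rw [if_pos h]
    have hr : PySem.List.pyRange 1 (p.length : Int) 2 = [] := by
      rw [PySem.List.pyRange_of_pos _ _ (by norm_num), if_neg (by exact_mod_cast by omega)]
      simp
    simp [hr]
  · rw [if_neg h]
    obtain ⟨a, q, rfl⟩ : ∃ a q, p = a :: q := by
      cases p with
      | nil => simp at h
      | cons a q => exact ⟨a, q, rfl⟩
    rw [pvCore_eq a q]
    have hq1 : 1 ≤ q.length := by simp only [List.length_cons] at h; omega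
    -- rewrite B's range(1, n, 2) as a map over List.range (n / 2)
    have hlen : 1 < (a :: q).length := by simp only [List.length_cons]; omega
    have hM : ((((a :: q).length : Int) - 1 + 2 - 1) / 2).toNat = (a :: q).length / 2 := by
      omega
    have hr : PySem.List.pyRange 1 ((a :: q).length : Int) 2 =
        (List.range ((a :: q).length / 2)).map (fun t : Nat => 1 + 2 * (t : Int)) := by
      rw [PySem.List.pyRange_of_pos _ _ (by norm_num : (0:Int) < 2),
        if_pos (by exact_mod_cast hlen), hM]
    rw [hr, List.foldl_map]
    set n := (a :: q).length with hn
    have hnq : n = q.length + 1 := by simp [hn]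
    rcases pvFold_char (a :: q) (n / 2) with ⟨he, hall⟩ | ⟨T, hT, he, hne, hafter⟩
    · -- every odd coefficient is zero: both sides are [0]
      rw [he, if_pos rfl]
      apply pvStrip_zeros q.length (pvAltKZ q) (pvAltKZ_length q) hq1
      intro j hj
      rw [pvAltKZ_getElem? q j hj]
      by_cases hj2 : j % 2 = 0
      · rw [if_pos hj2]
        obtain ⟨t, rfl⟩ : ∃ t, j = 2 * t := ⟨j / 2, by omega⟩
        have hz := hall t (by omega)
        have : (1 : Int) + 2 * (t : Int) = ((2 * t : Nat) : Int) + 1 := by push_cast; ring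
        rw [this, pvGetD_tail a q (2 * t)] at hz
        rw [List.getElem?_eq_getElem hj]
        have : q.getD (2 * t) 0 = q[2 * t] := by
          simp [List.getD_eq_getElem?_getD, List.getElem?_eq_getElem hj]
        rw [this] at hz
        rw [hz]
      · rw [if_neg hj2]
    · -- k = 2T + 1: A strips down to exactly the first 2T+1 entries
      rw [he, if_neg (by omega)]
      have hTn : 2 * T + 1 ≤ q.length := by omega
      have hlast : (pvAltKZ q)[2 * T + 1 - 1]? ≠ some 0 := by
        have h2T : 2 * T < q.length := by omega
        rw [show 2 * T + 1 - 1 = 2 * T from rfl, pvAltKZ_getElem? q (2 * T) h2T,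
          if_pos (by omega)]
        have : (1 : Int) + 2 * (T : Int) = ((2 * T : Nat) : Int) + 1 := by push_cast; ring
        rw [this, pvGetD_tail a q (2 * T)] at hne
        rw [List.getElem?_eq_getElem h2T]
        have hgd : q.getD (2 * T) 0 = q[2 * T] := by
          simp [List.getD_eq_getElem?_getD, List.getElem?_eq_getElem h2T]
        rw [hgd] at hne
        simpa using hne
      have hz : ∀ j, 2 * T + 1 ≤ j → j < q.length → (pvAltKZ q)[j]? = some 0 := by
        intro j hj1 hj2
        rw [pvAltKZ_getElem? q j hj2]
        by_cases hj3 : j % 2 = 0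
        · rw [if_pos hj3]
          obtain ⟨t, rfl⟩ : ∃ t, j = 2 * t := ⟨j / 2, by omega⟩
          have hzt := hafter t (by omega) (by omega)
          have : (1 : Int) + 2 * (t : Int) = ((2 * t : Nat) : Int) + 1 := by push_cast; ring
          rw [this, pvGetD_tail a q (2 * t)] at hzt
          rw [List.getElem?_eq_getElem hj2]
          have : q.getD (2 * t) 0 = q[2 * t] := by
            simp [List.getD_eq_getElem?_getD, List.getElem?_eq_getElem hj2]
          rw [this] at hzt
          rw [hzt]
        · rw [if_neg hj3]
      rw [pvStrip_take q.length (pvAltKZ q) (2 * T + 1) (pvAltKZ_length q) (by omega) hTn hlast hz]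
      -- the taken prefix equals B's comprehension
      have hcast : (1 : Int) + 2 * (T : Int) = ((2 * T + 1 : Nat) : Int) := by push_cast; ring
      rw [hcast, PySem.List.pyRange_zero_natCast, List.map_map]
      apply List.ext_getElem?
      intro j
      by_cases hj : j < 2 * T + 1
      · rw [List.getElem?_take, if_pos hj,
          List.getElem?_map, List.getElem?_range hj,
          pvAltKZ_getElem? q j (by omega)]
        simp only [Option.map_some, Function.comp]
        have hmod : PySem.Int.mod ((j : Nat) : Int) 2 = ((j % 2 : Nat) : Int) := by
          rw [PySem.Int.mod_eq_emod_of_pos (by norm_num)]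
          omega
        by_cases hj2 : j % 2 = 0
        · rw [if_pos hj2, if_pos (by rw [hmod, hj2]; rfl)]
          rw [pvGetD_tail a q j, List.getElem?_eq_getElem (show j < q.length by omega)]
          have : q.getD j 0 = q[j] := by
            simp [List.getD_eq_getElem?_getD, List.getElem?_eq_getElem (show j < q.length by omega)]
          rw [this]
        · rw [if_neg hj2, if_neg (by rw [hmod]; exact_mod_cast by omega)]
      · rw [List.getElem?_take, if_neg hj, List.getElem?_map,
          List.getElem?_eq_none (by simp; omega)]
        rfl
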